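-- pv_equiv track=rewrite | github.com/luxuyang6/work_summary_2019_2022 | PHVM_src/models/PHVM.py | _agg_group
-- ===== SOURCE A (Python) =====
-- def _agg_group(stop, text):
--
--     translation = []
--     for gcnt, sent in zip(stop, text):
--         sent = sent[:gcnt]
--         desc = []
--         for segId, seg in enumerate(sent):
--             for wid in seg:
--                 if wid == 2:  #end_token
--                     desc.append(wid)
--                     break
--                 elif wid == 0 or wid == 1:  # start_token or pad
--                     continue
--                 else:
--                     desc.append(wid)
--         translation.append(desc)
--
--     return translation
-- ===== SOURCE B (Python) =====
-- def _piece(seg):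
--     if 2 in seg:
--         i = seg.index(2)
--         return [w for w in seg[:i] if w != 0 and w != 1] + [2]
--     return [w for w in seg if w != 0 and w != 1]
--
--
-- def _agg_group(stop, text):
--     return [[w for seg in sent[:gcnt] for w in _piece(seg)]
--             for gcnt, sent in zip(stop, text)]
-- ===== Notes on version B (the rewrite author's own statement) =====
-- stated objective: simpler
-- what changed: Replaces the element-by-element inner loop with break/continue by find-first-2, slice, filter and flatten comprehensions.
import Mathlib
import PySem

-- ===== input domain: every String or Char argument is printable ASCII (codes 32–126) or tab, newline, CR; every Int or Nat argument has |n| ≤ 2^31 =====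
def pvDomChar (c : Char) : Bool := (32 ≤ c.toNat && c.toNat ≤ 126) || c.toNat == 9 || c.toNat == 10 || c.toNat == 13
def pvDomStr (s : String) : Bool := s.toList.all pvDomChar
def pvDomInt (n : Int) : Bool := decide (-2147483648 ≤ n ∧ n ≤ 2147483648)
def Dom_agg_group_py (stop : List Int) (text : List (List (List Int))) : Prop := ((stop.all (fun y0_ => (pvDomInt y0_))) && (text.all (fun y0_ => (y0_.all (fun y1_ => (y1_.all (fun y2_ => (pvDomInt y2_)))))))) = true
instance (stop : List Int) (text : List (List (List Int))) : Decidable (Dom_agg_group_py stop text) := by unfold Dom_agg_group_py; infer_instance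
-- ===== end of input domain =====

-- B replaces A's element-by-element inner loop with break/continue by a
-- find-first-end-token / slice / filter / flatten decomposition (objective: simpler).


-- ===== PORT A =====
-- inner loop over one segment: 'for wid in seg: if wid==2: append; break elif wid in (0,1): continue else: append'
def aggInnerA (desc : List Int) : List Int → List Int
  | [] => desc
  | wid :: rest =>
    if wid = 2 then desc ++ [2]
    else if wid = 0 ∨ wid = 1 then aggInnerA desc rest
    else aggInnerA (desc ++ [wid]) rest

def agg_group_py (stop : List Int) (text : List (List (List Int))) : List (List Int) :=
  (List.zip stop text).foldl
    (fun translation p =>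
      let sent := PySem.List.slice p.2 none (some p.1)   -- sent = sent[:gcnt]
      let desc := sent.foldl aggInnerA []
      translation ++ [desc])
    []

-- ===== PORT B =====
-- '2 in seg' + 'seg.index(2)' ported together as one match on index? (some ↔ membership)
def aggPiece (seg : List Int) : List Int :=
  match PySem.List.index? seg 2 with
  | some i => (PySem.List.slice seg none (some (i : Int))).filter (fun w => !(w == 0) && !(w == 1)) ++ [2]
  | none => seg.filter (fun w => !(w == 0) && !(w == 1))

def agg_group_py_alt (stop : List Int) (text : List (List (List Int))) : List (List Int) :=
  (List.zip stop text).map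
    (fun p => ((PySem.List.slice p.2 none (some p.1)).map aggPiece).flatten)

-- ===== PRECONDITION & SPEC =====
def Spec_agg_group_py (stop : List Int) (text : List (List (List Int))) (out : List (List Int)) : Prop := out = agg_group_py_alt stop text
instance (stop : List Int) (text : List (List (List Int))) (out : List (List Int)) : Decidable (Spec_agg_group_py stop text out) := by unfold Spec_agg_group_py; infer_instance

-- ===== CLAIM (what is proved, stated in full; the proofs are below) =====
def Claim_equal_agg_group_py : Prop := ∀ (stop : List Int) (text : List (List (List Int))), Dom_agg_group_py stop text → Spec_agg_group_py stop text (agg_group_py stop text)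

-- ===== LEMMAS AND PROOFS =====

-- per-segment agreement: A's inner loop appends exactly B's piece
theorem aggInnerA_eq (seg : List Int) : ∀ desc, aggInnerA desc seg = desc ++ aggPiece seg := by
  induction seg with
  | nil => intro desc; simp [aggInnerA, aggPiece, PySem.List.index?]
  | cons w rest ih =>
    intro desc
    by_cases h2 : w = 2
    · subst h2
      have h0 : PySem.List.index? ((2:Int) :: rest) 2 = some 0 := PySem.List.index?_cons_self _ _
      have hp : aggPiece ((2:Int) :: rest) = [2] := by
        unfold aggPiece
        rw [h0]
        simp [PySem.List.slice_to]
      simp [aggInnerA, hp]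
    · have hidx : PySem.List.index? (w :: rest) 2 = (PySem.List.index? rest 2).map (· + 1) :=
        PySem.List.index?_cons_of_ne _ h2
      by_cases h01 : w = 0 ∨ w = 1
      · have : aggInnerA desc (w :: rest) = aggInnerA desc rest := by
          simp [aggInnerA, h2, h01]
        rw [this, ih]
        congr 1
        unfold aggPiece
        rw [hidx]
        cases hr : PySem.List.index? rest 2 with
        | none => rcases h01 with h | h <;> simp [h]
        | some i =>
          simp only [Option.map_some]
          have hs : PySem.List.slice (w :: rest) none (some ((i + 1 : Nat) : Int)) = w :: PySem.List.slice rest none (some (i : Int)) := by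
            rw [PySem.List.slice_to_natCast, PySem.List.slice_to_natCast]
            simp [List.take_succ_cons]
          rw [hs]
          rcases h01 with h | h <;> simp [h]
      · have : aggInnerA desc (w :: rest) = aggInnerA (desc ++ [w]) rest := by
          simp [aggInnerA, h2, h01]
        rw [this, ih]
        have hW : aggPiece (w :: rest) = w :: aggPiece rest := by
          unfold aggPiece
          rw [hidx]
          push Not at h01
          cases hr : PySem.List.index? rest 2 with
          | none => simp [h01.1, h01.2]
          | some i =>
            simp only [Option.map_some]
            have hs : PySem.List.slice (w :: rest) none (some ((i + 1 : Nat) : Int)) = w :: PySem.List.slice rest none (some (i : Int)) := by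
              rw [PySem.List.slice_to_natCast, PySem.List.slice_to_natCast]
              simp [List.take_succ_cons]
            rw [hs]
            simp [h01.1, h01.2]
        rw [hW]
        simp

-- A's middle loop = flatten of B's per-segment pieces
theorem foldl_aggInnerA (segs : List (List Int)) : ∀ desc, segs.foldl aggInnerA desc = desc ++ (segs.map aggPiece).flatten := by
  induction segs with
  | nil => intro desc; simp
  | cons s rest ih =>
    intro desc
    simp only [List.foldl_cons, List.map_cons, List.flatten_cons]
    rw [aggInnerA_eq, ih, List.append_assoc]

-- A's outer accumulation = B's map
theorem foldl_outer (g : Int × List (List Int) → List Int) (l : List (Int × List (List Int))) : ∀ init, l.foldl (fun tr p => tr ++ [g p]) init = init ++ l.map g := by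
  induction l with
  | nil => intro init; simp
  | cons p rest ih => intro init; simp [ih]

-- ===== VERDICT (by name: the statement is the Claim_ definition above) =====
theorem agg_group_py_spec : Claim_equal_agg_group_py := by
  intro stop text _
  unfold Spec_agg_group_py agg_group_py agg_group_py_alt
  simp only [foldl_aggInnerA, List.nil_append]
  exact foldl_outer _ _ []
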